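-- pv_equiv track=rewrite | github.com/kebtes/competitive-programming | 12-Jun-2024/Additive Number 166996.py | isAdditiveNumber
-- ===== SOURCE A (Python) =====
-- def isAdditiveNumber(num: str) -> bool:
--     if len(num) < 3:
--         return False
--
--     def func(f_num, s_num, rem):
--         if len(rem) < max(len(f_num), len(s_num)):
--             return False
--
--         if (f_num[0] == "0" and len(f_num) != 1) or (s_num[0] == "0" and len(s_num) != 1):
--             return False
--
--         result = str(int(f_num) + int(s_num))
--
--         if len(rem) < len(result):
--             return False
--
--         if result == rem[0: len(result)]:
--             if len(rem) == len(result):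
--                 return True
--
--             return func(s_num, result, rem[len(result):])
--
--         return False
--
--     for i in range(1, len(num)):
--         for j in range(i+1, len(num)):
--             f_num = num[:i]
--             s_num = num[i:j]
--             rem = num[j:]
--
--             if func(f_num, s_num, rem): return True
--
--     return False
-- ===== SOURCE B (Python) =====
-- def isAdditiveNumber(num: str) -> bool:
--     n = len(num)
--     if n < 3:
--         return False
--     for i in range(1, n):
--         if i > 1 and num[0] == '0':
--             break
--         for j in range(i + 1, n):
--             if j > i + 1 and num[i] == '0':
--                 break
--             a, b, k = num[:i], num[i:j], j
--             while n - k >= max(len(a), len(b)):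
--                 c = str(int(a) + int(b))
--                 if num[k:k + len(c)] != c:
--                     break
--                 k += len(c)
--                 if k == n:
--                     return True
--                 a, b = b, c
--     return False
-- ===== Notes on version B (the rewrite author's own statement) =====
-- stated objective: alternative
-- what changed: A's guarded recursive helper is replaced by an explicit while loop that advances a suffix offset and the current pair, with the leading-zero guards hoisted out of the step into the two split loops as breaks (pruning all later splits) and the redundant per-step length re-check dropped.
-- outside the precondition, e.g. on isAdditiveNumber('00x'): A returns False, B returns False
import Mathlib
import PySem

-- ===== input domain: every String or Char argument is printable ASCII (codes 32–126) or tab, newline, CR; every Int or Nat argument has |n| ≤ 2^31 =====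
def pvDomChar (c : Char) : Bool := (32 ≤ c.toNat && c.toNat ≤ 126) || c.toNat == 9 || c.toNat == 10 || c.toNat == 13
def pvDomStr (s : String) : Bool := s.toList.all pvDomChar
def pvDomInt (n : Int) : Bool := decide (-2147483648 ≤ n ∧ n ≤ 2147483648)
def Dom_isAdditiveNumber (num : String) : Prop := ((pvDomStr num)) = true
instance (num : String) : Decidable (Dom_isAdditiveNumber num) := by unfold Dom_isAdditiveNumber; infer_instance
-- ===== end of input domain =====

-- B replaces A's guarded recursive helper by an explicit while loop over a suffix offset with the
-- leading-zero guards hoisted into the split loops as breaks (objective: alternative decomposition).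

-- ===== PORT A =====

-- str(int) is never empty (needed by the ports' termination)
theorem pvToChars_ne_nil (n : Int) : PySem.Int.toChars n ≠ [] := by
  unfold PySem.Int.toChars
  split
  · simp
  · have := @Nat.length_toDigits_pos 10 n.toNat
    intro h
    simp [h] at this

-- A's recursive helper `func(f_num, s_num, rem)`
def pvFuncA (f s rem : List Char) : Bool :=
  if rem.length < max f.length s.length then false
  else if (PySem.List.pyGet? f 0 = some '0' ∧ f.length ≠ 1) ∨
          (PySem.List.pyGet? s 0 = some '0' ∧ s.length ≠ 1) then false
  else
    match PySem.Int.ofChars? f, PySem.Int.ofChars? s with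
    | some a, some b =>
      let result := PySem.Int.toChars (a + b)
      if _h1 : rem.length < result.length then false
      else if result = PySem.List.slice rem (some 0) (some (result.length : Int)) then
        if rem.length = result.length then true
        else pvFuncA s result (PySem.List.slice rem (some (result.length : Int)) none)
      else false
    | _, _ => false
termination_by rem.length
decreasing_by
  have hne := pvToChars_ne_nil (a + b)
  simp only [PySem.List.slice_from_natCast, List.length_drop]
  have : (PySem.Int.toChars (a + b)).length ≠ 0 := by
    simpa [List.length_eq_zero_iff] using hne
  omega

-- A's `for j in range(i+1, len(num))` loop
def pvALoopJ (num : List Char) (i j : Nat) : Bool :=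
  if _h : j < num.length then
    if pvFuncA (PySem.List.slice num none (some (i : Int)))
               (PySem.List.slice num (some (i : Int)) (some (j : Int)))
               (PySem.List.slice num (some (j : Int)) none)
    then true
    else pvALoopJ num i (j + 1)
  else false
termination_by num.length - j

-- A's `for i in range(1, len(num))` loop
def pvALoopI (num : List Char) (i : Nat) : Bool :=
  if _h : i < num.length then
    if pvALoopJ num i (i + 1) then true else pvALoopI num (i + 1)
  else false
termination_by num.length - i

def isAdditiveNumber (num : String) : Bool :=
  if num.toList.length < 3 then false else pvALoopI num.toList 1

-- ===== PORT B =====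

-- B's while loop over the current pair (a, b) and the suffix offset k
def pvBLoop (num a b : List Char) (k : Nat) : Bool :=
  if num.length - k ≥ max a.length b.length then
    match PySem.Int.ofChars? a, PySem.Int.ofChars? b with
    | some x, some y =>
      let c := PySem.Int.toChars (x + y)
      if hc : PySem.List.slice num (some (k : Int)) (some ((k : Int) + (c.length : Int))) = c then
        if k + c.length = num.length then true
        else pvBLoop num b c (k + c.length)
      else false
    | _, _ => false
  else false
termination_by num.length - k
decreasing_by
  have hne := pvToChars_ne_nil (x + y)
  have hlen : (PySem.List.slice num (some (k : Int)) (some ((k : Int) + ((PySem.Int.toChars (x + y)).length : Int)))).length = (PySem.Int.toChars (x + y)).length := by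
    rw [hc]
  rw [PySem.List.slice_natCast_add, List.length_take, List.length_drop] at hlen
  have : (PySem.Int.toChars (x + y)).length ≠ 0 := by
    simpa [List.length_eq_zero_iff] using hne
  omega

-- B's j loop, with the hoisted second-number leading-zero break
def pvBLoopJ (num : List Char) (i j : Nat) : Bool :=
  if _h : j < num.length then
    if j > i + 1 ∧ PySem.List.pyGet? num (i : Int) = some '0' then false
    else if pvBLoop num (PySem.List.slice num none (some (i : Int)))
                        (PySem.List.slice num (some (i : Int)) (some (j : Int))) j
    then true
    else pvBLoopJ num i (j + 1)
  else false
termination_by num.length - j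

-- B's i loop, with the hoisted first-number leading-zero break
def pvBLoopI (num : List Char) (i : Nat) : Bool :=
  if _h : i < num.length then
    if i > 1 ∧ PySem.List.pyGet? num 0 = some '0' then false
    else if pvBLoopJ num i (i + 1) then true
    else pvBLoopI num (i + 1)
  else false
termination_by num.length - i

def isAdditiveNumber_alt (num : String) : Bool :=
  if num.toList.length < 3 then false else pvBLoopI num.toList 1

-- ===== PRECONDITION & SPEC =====
-- Pre_ excludes length-≥3 inputs containing a non-digit character: on almost all of them A raises
-- ValueError from int(); on the rare ones where every split fails a guard first (e.g. "00x") A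
-- happens to return False, and B returns False there as well.
def Pre_isAdditiveNumber (num : String) : Prop :=
  num.toList.length < 3 ∨ num.toList.all Char.isDigit = true
instance (num : String) : Decidable (Pre_isAdditiveNumber num) := by
  unfold Pre_isAdditiveNumber; infer_instance
def pvWitness_isAdditiveNumber : String := "112358"

def Spec_isAdditiveNumber (num : String) (out : Bool) : Prop := out = isAdditiveNumber_alt num
instance (num : String) (out : Bool) : Decidable (Spec_isAdditiveNumber num out) := by unfold Spec_isAdditiveNumber; infer_instance

-- ===== CLAIM (what is proved, stated in full; the proofs are below) =====
def Claim_equal_isAdditiveNumber : Prop := ∀ (num : String), Dom_isAdditiveNumber num → Pre_isAdditiveNumber num → Spec_isAdditiveNumber num (isAdditiveNumber num)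

-- ===== LEMMAS AND PROOFS =====

def pvValid (s : List Char) : Prop :=
  s ≠ [] ∧ (PySem.List.pyGet? s 0 = some '0' → s.length = 1)

theorem pvFuncA_invalid_s (f s rem : List Char)
    (h0 : PySem.List.pyGet? s 0 = some '0') (h1 : s.length ≠ 1) :
    pvFuncA f s rem = false := by
  unfold pvFuncA
  split
  · rfl
  · rw [if_pos (Or.inr ⟨h0, h1⟩)]

theorem pvFuncA_invalid_f (f s rem : List Char)
    (h0 : PySem.List.pyGet? f 0 = some '0') (h1 : f.length ≠ 1) :
    pvFuncA f s rem = false := by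
  unfold pvFuncA
  split
  · rfl
  · rw [if_pos (Or.inl ⟨h0, h1⟩)]
theorem pvDigits_head_zero {m : Nat} (h : (Nat.toDigits 10 m).head? = some '0') : m = 0 := by
  induction m using Nat.strong_induction_on with
  | _ m ih =>
    by_cases hm : m < 10
    · rw [Nat.toDigits_of_lt_base hm] at h
      simp at h
      interval_cases m <;> simp_all [Nat.digitChar]
    · rw [Nat.toDigits_of_base_le (by norm_num) (by omega)] at h
      rw [List.head?_append_of_ne_nil] at h
      · have := ih (m / 10) (by omega) h
        omega
      · intro hnil
        have := @Nat.length_toDigits_pos 10 (m / 10)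
        simp [hnil] at this

theorem pvValid_toChars (n : Int) : pvValid (PySem.Int.toChars n) := by
  refine ⟨pvToChars_ne_nil n, ?_⟩
  unfold PySem.Int.toChars
  split
  · intro h
    simp [PySem.List.pyGet?, PySem.List.pyIdx?] at h
  · have hne : Nat.toDigits 10 n.toNat ≠ [] := by
      have := @Nat.length_toDigits_pos 10 n.toNat
      intro hnil; simp [hnil] at this
    intro h
    have hh : (Nat.toDigits 10 n.toNat).head? = some '0' := by
      cases hds : Nat.toDigits 10 n.toNat with
      | nil => exact absurd hds hne
      | cons c cs => simp [hds, PySem.List.pyGet?, PySem.List.pyIdx?] at h ⊢; exact h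
    rw [pvDigits_head_zero hh]
    decide

theorem pvInner (num : List Char) : ∀ (m : Nat) (a b : List Char) (k : Nat),
    num.length - k = m → k ≤ num.length → pvValid a → pvValid b →
    pvFuncA a b (num.drop k) = pvBLoop num a b k := by
  intro m
  induction m using Nat.strong_induction_on with
  | _ m ih =>
    intro a b k hm hk ha hb
    subst hm
    unfold pvFuncA pvBLoop
    have hdl : (num.drop k).length = num.length - k := List.length_drop ..
    rw [hdl]
    by_cases hcond : num.length - k < max a.length b.length
    · have hn : ¬ (num.length - k ≥ max a.length b.length) := by omega
      rw [if_pos hcond, if_neg hn]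
    · have hp : num.length - k ≥ max a.length b.length := by omega
      rw [if_neg hcond, if_pos hp]
      rw [if_neg ?grd]
      case grd =>
        rintro (⟨h0, h1⟩ | ⟨h0, h1⟩)
        · exact h1 (ha.2 h0)
        · exact h1 (hb.2 h0)
      cases hpa : PySem.Int.ofChars? a with
      | none => cases PySem.Int.ofChars? b <;> rfl
      | some x =>
        cases hpb : PySem.Int.ofChars? b with
        | none => rfl
        | some y =>
          simp only []
          have hlc1 : (PySem.Int.toChars (x + y)).length ≠ 0 := by
            simpa [List.length_eq_zero_iff] using pvToChars_ne_nil (x + y)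
          have hsliceA : PySem.List.slice (num.drop k) (some 0) (some ((PySem.Int.toChars (x + y)).length : Int)) = (num.drop k).take (PySem.Int.toChars (x + y)).length := by
            rw [PySem.List.slice_zero_start, PySem.List.slice_to_natCast]
          have hsliceB : PySem.List.slice num (some (k : Int)) (some ((k : Int) + ((PySem.Int.toChars (x + y)).length : Int))) = (num.drop k).take (PySem.Int.toChars (x + y)).length := by
            rw [PySem.List.slice_natCast_add]
          by_cases hlt : num.length - k < (PySem.Int.toChars (x + y)).length
          · rw [dif_pos hlt, dif_neg ?short]
            case short =>
              rw [hsliceB]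
              intro h
              have := congrArg List.length h
              simp at this
              omega
          · rw [dif_neg hlt]
            by_cases heq : (num.drop k).take (PySem.Int.toChars (x + y)).length = PySem.Int.toChars (x + y)
            · rw [if_pos (hsliceA ▸ heq.symm), dif_pos (hsliceB ▸ heq)]
              by_cases hend : num.length - k = (PySem.Int.toChars (x + y)).length
              · rw [if_pos hend, if_pos (by omega)]
              · rw [if_neg hend, if_neg (by omega)]
                rw [PySem.List.slice_from_natCast, List.drop_drop]
                exact ih (num.length - (k + (PySem.Int.toChars (x + y)).length)) (by omega)
                  b (PySem.Int.toChars (x + y)) (k + (PySem.Int.toChars (x + y)).length)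
                  rfl (by omega) hb (pvValid_toChars (x + y))
            · rw [if_neg (fun h => heq (hsliceA ▸ h.symm)), dif_neg (fun h => heq (hsliceB ▸ h))]

theorem pvGet0 (xs : List Char) : PySem.List.pyGet? xs 0 = xs[0]? := by
  simp [PySem.List.pyGet?, PySem.List.pyIdx?]
  split
  · rfl
  · rename_i h
    rw [List.getElem?_eq_none (by omega)]
    rfl

-- the second number num[i:j] has a leading zero and length ≥ 2
theorem pvS_invalid (num : List Char) (i j : Nat) (hij : i + 2 ≤ j) (hj : j ≤ num.length)
    (h0 : num[i]? = some '0') :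
    PySem.List.pyGet? (PySem.List.slice num (some (i : Int)) (some (j : Int))) 0 = some '0' ∧
    (PySem.List.slice num (some (i : Int)) (some (j : Int))).length ≠ 1 := by
  rw [PySem.List.slice_natCast, pvGet0]
  constructor
  · rw [List.getElem?_take, if_pos (by omega), List.getElem?_drop, Nat.add_zero]
    exact h0
  · simp
    omega

theorem pvALoopJ_false_of_szero (num : List Char) (i : Nat) (h0 : num[i]? = some '0') :
    ∀ j, i + 2 ≤ j → pvALoopJ num i j = false := by
  intro j
  induction hj : num.length - j using Nat.strong_induction_on generalizing j with
  | _ m ih =>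
    intro hij
    subst hj
    unfold pvALoopJ
    split
    · rename_i hlt
      obtain ⟨hs0, hs1⟩ := pvS_invalid num i j hij (le_of_lt hlt) h0
      rw [pvFuncA_invalid_s _ _ _ hs0 hs1]
      simpa using ih (num.length - (j+1)) (by omega) (j+1) rfl (by omega)
    · rfl

-- the first number num[:i'] has a leading zero and length ≥ 2
theorem pvF_invalid (num : List Char) (i : Nat) (hi : 2 ≤ i) (hin : i ≤ num.length)
    (h0 : num[0]? = some '0') :
    PySem.List.pyGet? (PySem.List.slice num none (some (i : Int))) 0 = some '0' ∧
    (PySem.List.slice num none (some (i : Int))).length ≠ 1 := by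
  rw [PySem.List.slice_to_natCast, pvGet0]
  constructor
  · rw [List.getElem?_take, if_pos (by omega)]
    exact h0
  · simp
    omega

theorem pvALoopJ_false_of_fzero (num : List Char) (i : Nat) (hi : 2 ≤ i) (hin : i ≤ num.length)
    (h0 : num[0]? = some '0') :
    ∀ j, pvALoopJ num i j = false := by
  intro j
  induction hj : num.length - j using Nat.strong_induction_on generalizing j with
  | _ m ih =>
    subst hj
    unfold pvALoopJ
    split
    · obtain ⟨hf0, hf1⟩ := pvF_invalid num i hi hin h0
      rw [pvFuncA_invalid_f _ _ _ hf0 hf1]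
      simpa using ih (num.length - (j+1)) (by omega) (j+1) rfl
    · rfl

theorem pvALoopI_false_of_fzero (num : List Char) (h0 : num[0]? = some '0') :
    ∀ i, 2 ≤ i → pvALoopI num i = false := by
  intro i
  induction hi : num.length - i using Nat.strong_induction_on generalizing i with
  | _ m ih =>
    intro h2
    subst hi
    unfold pvALoopI
    split
    · rename_i hlt
      rw [pvALoopJ_false_of_fzero num i h2 (le_of_lt hlt) h0]
      simpa using ih (num.length - (i+1)) (by omega) (i+1) rfl (by omega)
    · rfl

theorem pvLoopJ_eq (num : List Char) (i : Nat)
    (hvf : pvValid (PySem.List.slice num none (some (i : Int)))) :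
    ∀ j, i + 1 ≤ j → pvALoopJ num i j = pvBLoopJ num i j := by
  intro j
  induction hj : num.length - j using Nat.strong_induction_on generalizing j with
  | _ m ih =>
    intro hij
    subst hj
    unfold pvALoopJ pvBLoopJ
    split
    · rename_i hlt
      by_cases hbr : j > i + 1 ∧ PySem.List.pyGet? num (i : Int) = some '0'
      · rw [if_pos hbr]
        obtain ⟨hji, h0⟩ := hbr
        rw [PySem.List.pyGet?_natCast] at h0
        obtain ⟨hs0, hs1⟩ := pvS_invalid num i j (by omega) (le_of_lt hlt) h0
        rw [pvFuncA_invalid_s _ _ _ hs0 hs1]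
        exact pvALoopJ_false_of_szero num i h0 (j+1) (by omega)
      · rw [if_neg hbr]
        have hvs : pvValid (PySem.List.slice num (some (i : Int)) (some (j : Int))) := by
          rw [PySem.List.slice_natCast]
          constructor
          · intro hnil
            have := congrArg List.length hnil
            simp at this
            omega
          · intro h0
            by_cases hj1 : j = i + 1
            · simp [hj1]
              omega
            · exfalso
              rw [pvGet0, List.getElem?_take, if_pos (by omega), List.getElem?_drop, Nat.add_zero] at h0
              exact hbr ⟨by omega, by rw [PySem.List.pyGet?_natCast]; exact h0⟩
        have hrem : PySem.List.slice num (some (j : Int)) none = num.drop j := PySem.List.slice_from_natCast num j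
        rw [hrem]
        have hinner := pvInner num (num.length - j)
          (PySem.List.slice num none (some (i : Int)))
          (PySem.List.slice num (some (i : Int)) (some (j : Int)))
          j rfl (le_of_lt hlt) hvf hvs
        rw [hinner]
        split
        · rfl
        · exact ih (num.length - (j+1)) (by omega) (j+1) rfl (by omega)
    · rfl

theorem pvLoopI_eq (num : List Char) : ∀ i, 1 ≤ i → pvALoopI num i = pvBLoopI num i := by
  intro i
  induction hi : num.length - i using Nat.strong_induction_on generalizing i with
  | _ m ih =>
    intro h1
    subst hi
    unfold pvALoopI pvBLoopI
    split
    · rename_i hlt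
      by_cases hbr : i > 1 ∧ PySem.List.pyGet? num 0 = some '0'
      · rw [if_pos hbr]
        obtain ⟨hi1, h0⟩ := hbr
        rw [pvGet0] at h0
        rw [pvALoopJ_false_of_fzero num i (by omega) (le_of_lt hlt) h0]
        exact pvALoopI_false_of_fzero num h0 (i+1) (by omega)
      · rw [if_neg hbr]
        have hvf : pvValid (PySem.List.slice num none (some (i : Int))) := by
          rw [PySem.List.slice_to_natCast]
          constructor
          · intro hnil
            have := congrArg List.length hnil
            simp at this
            rcases this with h | h
            · omega
            · subst h
              simp at hlt
          · intro h0
            by_cases hi1 : i = 1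
            · subst hi1
              cases num with
              | nil => simp at *
              | cons c cs => simp
            · exfalso
              rw [pvGet0, List.getElem?_take, if_pos (by omega)] at h0
              exact hbr ⟨by omega, by rw [pvGet0]; exact h0⟩
        rw [pvLoopJ_eq num i hvf (i+1) le_rfl]
        split
        · rfl
        · exact ih (num.length - (i+1)) (by omega) (i+1) rfl (by omega)
    · rfl

-- ===== VERDICT (by name: the statement is the Claim_ definition above) =====
theorem isAdditiveNumber_spec : Claim_equal_isAdditiveNumber := by
  intro num _ _
  unfold Spec_isAdditiveNumber isAdditiveNumber isAdditiveNumber_alt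
  split
  · rfl
  · exact pvLoopI_eq num.toList 1 le_rfl
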